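-- pv_equiv track=rewrite | github.com/SumoLogic/sumologic-kubernetes-collection | ci/check_configuration_keys.py | compare_list_of_keys
-- ===== SOURCE A (Python) =====
-- def compare_keys(this: str, other: str) -> bool:
--     """Compares this and other and returns true if any of arguments begins with other.
--
--     Args:
--         this (str): string to compare
--         other (str): string to compare
--
--     Returns:
--         bool: _description_
--     """
--     return this.startswith(other) or other.startswith(this)
--
-- def compare_list_of_keys(this: list[str], other: list[str]) -> list:
--     """Returns all elements from this which are not beginning of any element of other
--
--     Args:
--         this (list[str]): list of elements to check
--         other (list[str]): list of elements to check against
--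
--     Returns:
--         list[str]: all elements from this which are not beginning of any element of other
--     """
--     diff = []
--
--     for this_key in this:
--         found = False
--         for other_key in other:
--             if compare_keys(this_key, other_key):
--                 found = True
--                 break
--         if not found:
--             diff.append(this_key)
--
--     return sorted(diff)
-- ===== SOURCE B (Python) =====
-- def compare_list_of_keys(this: list[str], other: list[str]) -> list:
--     """All elements of this with no prefix relation to any element of other,
--     via hash sets of prefixes instead of the pairwise scan."""
--     others = set(other)
--     prefixes = set()
--     for o in other:
--         for i in range(len(o) + 1):
--             prefixes.add(o[:i])
--     diff = [t for t in this
--             if t not in prefixes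
--             and not any(t[:i] in others for i in range(len(t) + 1))]
--     return sorted(diff)
-- ===== Notes on version B (the rewrite author's own statement) =====
-- stated objective: faster
-- what changed: Replaces the nested scan of this x other with two hash sets built once (all prefixes of other, and other itself), so each this-key is checked by set lookups on its prefixes instead of comparing against every other-key.
import Mathlib
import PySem

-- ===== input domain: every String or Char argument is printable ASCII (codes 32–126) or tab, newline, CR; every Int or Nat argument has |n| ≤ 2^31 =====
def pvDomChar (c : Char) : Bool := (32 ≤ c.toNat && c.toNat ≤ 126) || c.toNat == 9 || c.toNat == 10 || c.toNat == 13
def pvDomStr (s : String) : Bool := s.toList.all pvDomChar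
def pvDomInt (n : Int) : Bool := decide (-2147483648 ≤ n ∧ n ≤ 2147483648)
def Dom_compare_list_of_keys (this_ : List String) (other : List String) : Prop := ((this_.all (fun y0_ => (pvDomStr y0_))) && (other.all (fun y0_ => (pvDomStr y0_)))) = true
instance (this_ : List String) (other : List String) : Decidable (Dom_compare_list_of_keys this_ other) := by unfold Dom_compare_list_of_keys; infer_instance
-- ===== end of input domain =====

-- B replaces A's pairwise this×other scan with two hash sets (all prefixes of other, and other itself) queried per key: a different, asymptotically faster algorithm.


-- ===== PORT A =====
def compare_keys (this_ : String) (other : String) : Bool :=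
  PySem.Str.startswith this_ other || PySem.Str.startswith other this_

-- A's inner 'for other_key in other: if compare_keys(...): found = True; break'
def pvFoundA (this_key : String) : List String → Bool
  | [] => false
  | other_key :: rest =>
      if compare_keys this_key other_key then true else pvFoundA this_key rest

def compare_list_of_keys (this_ : List String) (other : List String) : List String :=
  let diff := this_.foldl
    (fun diff this_key => if pvFoundA this_key other then diff else diff ++ [this_key]) []
  PySem.List.sorted diff (fun x => x) false

-- ===== PORT B =====
def compare_list_of_keys_alt (this_ : List String) (other : List String) : List String :=
  let others : PySem.Set String := PySem.Set.ofList other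
  let prefixes : PySem.Set String :=
    other.foldl (fun s o =>
      (PySem.List.pyRange 0 ((PySem.Str.len o : Int) + 1)).foldl
        (fun s i => PySem.Set.add s (PySem.Str.slice o none (some i))) s)
      PySem.Set.empty
  let diff := this_.filter (fun t =>
    !(PySem.Set.contains prefixes t) &&
    !((PySem.List.pyRange 0 ((PySem.Str.len t : Int) + 1)).any
        (fun i => PySem.Set.contains others (PySem.Str.slice t none (some i)))))
  PySem.List.sorted diff (fun x => x) false

-- ===== PRECONDITION & SPEC =====
def Spec_compare_list_of_keys (this_ : List String) (other : List String) (out : List String) : Prop := out = compare_list_of_keys_alt this_ other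
instance (this_ : List String) (other : List String) (out : List String) : Decidable (Spec_compare_list_of_keys this_ other out) := by unfold Spec_compare_list_of_keys; infer_instance

-- ===== CLAIM (what is proved, stated in full; the proofs are below) =====
def Claim_equal_compare_list_of_keys : Prop := ∀ (this_ : List String) (other : List String), Dom_compare_list_of_keys this_ other → Spec_compare_list_of_keys this_ other (compare_list_of_keys this_ other)

-- ===== LEMMAS AND PROOFS =====

-- A's inner loop is an 'any' over other
theorem pvFoundA_eq_any (t : String) (l : List String) :
    pvFoundA t l = l.any (fun o => compare_keys t o) := by
  induction l with
  | nil => rfl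
  | cons o rest ih =>
      cases h : compare_keys t o <;> simp [pvFoundA, h, ih]

-- membership in a fold that adds f x for every x of l
theorem mem_foldl_add_map {α β : Type} [BEq α] [LawfulBEq α]
    (f : β → α) (l : List β) (s : PySem.Set α) (y : α) :
    y ∈ l.foldl (fun s x => PySem.Set.add s (f x)) s ↔ y ∈ s ∨ ∃ x ∈ l, f x = y := by
  induction l generalizing s with
  | nil => simp
  | cons x rest ih =>
      simp [List.foldl_cons, ih, PySem.Set.mem_add]
      tauto

-- a slice o[:i] for i in range(len(o)+1) equals t exactly when t is a prefix of o
theorem slice_range_iff_startswith (o t : String) :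
    (∃ i ∈ PySem.List.pyRange 0 ((PySem.Str.len o : Int) + 1),
        PySem.Str.slice o none (some i) = t) ↔ PySem.Str.startswith o t = true := by
  constructor
  · rintro ⟨i, hi, hslice⟩
    rw [PySem.List.mem_pyRange_one] at hi
    have h0 : (0:Int) ≤ i := hi.1
    rw [PySem.Str.startswith_eq, PySem.Chars.startswith_iff]
    rw [← hslice]
    rw [List.prefix_iff_eq_take]
    have : (PySem.Str.slice o none (some i)).toList = o.toList.take i.toNat := by
      rw [PySem.Str.toList_slice, PySem.Chars.slice_eq_listSlice, PySem.List.slice_to o.toList h0]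
    rw [this]
    simp [List.length_take]
  · intro h
    rw [PySem.Str.startswith_eq, PySem.Chars.startswith_iff] at h
    refine ⟨(t.toList.length : Int), ?_, ?_⟩
    · rw [PySem.List.mem_pyRange_one]
      have hle : t.toList.length ≤ o.toList.length := h.length_le
      constructor
      · exact_mod_cast Nat.zero_le _
      · have : (PySem.Str.len o : Int) = (o.toList.length : Int) := by
          simp [PySem.Str.len_eq]
        omega
    · rw [← String.toList_inj, PySem.Str.toList_slice, PySem.Chars.slice_eq_listSlice,
        PySem.List.slice_to_natCast]
      exact (List.prefix_iff_eq_take.mp h).symm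

-- B's per-key test agrees with A's per-key test
theorem pred_eq (other : List String) (t : String) :
    (!(PySem.Set.contains
        (other.foldl (fun s o =>
          (PySem.List.pyRange 0 ((PySem.Str.len o : Int) + 1)).foldl
            (fun s i => PySem.Set.add s (PySem.Str.slice o none (some i))) s)
          PySem.Set.empty) t) &&
     !((PySem.List.pyRange 0 ((PySem.Str.len t : Int) + 1)).any
        (fun i => PySem.Set.contains (PySem.Set.ofList other) (PySem.Str.slice t none (some i)))))
    = !(other.any (fun o => compare_keys t o)) := by
  rw [Bool.eq_iff_iff]
  simp only [Bool.and_eq_true, Bool.not_eq_true', Bool.eq_false_iff, Ne, List.any_eq_true]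
  constructor
  · rintro ⟨h1, h2⟩ ⟨o, ho, hc⟩
    rcases Bool.or_eq_true _ _ |>.mp hc with hts | hot
    · -- t startswith o : some prefix slice of t is in others
      apply h2
      rw [PySem.Str.startswith_eq, PySem.Chars.startswith_iff] at hts
      refine ⟨(o.toList.length : Int), ?_, ?_⟩
      · rw [PySem.List.mem_pyRange_one]
        have hle : o.toList.length ≤ t.toList.length := hts.length_le
        have : (PySem.Str.len t : Int) = (t.toList.length : Int) := by
          simp [PySem.Str.len_eq]
        constructor
        · exact_mod_cast Nat.zero_le _
        · omega
      · rw [PySem.Set.contains_iff, PySem.Set.mem_ofList]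
        have : PySem.Str.slice t none (some (o.toList.length : Int)) = o := by
          rw [← String.toList_inj, PySem.Str.toList_slice, PySem.Chars.slice_eq_listSlice,
            PySem.List.slice_to_natCast]
          exact (List.prefix_iff_eq_take.mp hts).symm
        rw [this]; exact ho
    · -- o startswith t : t is in prefixes
      apply h1
      rw [PySem.Set.contains_iff]
      have hmem : t ∈ other.foldl (fun s o =>
          (PySem.List.pyRange 0 ((PySem.Str.len o : Int) + 1)).foldl
            (fun s i => PySem.Set.add s (PySem.Str.slice o none (some i))) s)
          PySem.Set.empty := by
        have key : ∀ (l : List String) (s : PySem.Set String),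
            t ∈ l.foldl (fun s o =>
              (PySem.List.pyRange 0 ((PySem.Str.len o : Int) + 1)).foldl
                (fun s i => PySem.Set.add s (PySem.Str.slice o none (some i))) s) s
            ↔ t ∈ s ∨ ∃ o ∈ l, ∃ i ∈ PySem.List.pyRange 0 ((PySem.Str.len o : Int) + 1),
                PySem.Str.slice o none (some i) = t := by
          intro l
          induction l with
          | nil => simp
          | cons o rest ih =>
              intro s
              simp only [List.foldl_cons, ih, mem_foldl_add_map, List.mem_cons]
              constructor
              · rintro (⟨h | ⟨i, hi, he⟩⟩ | h)
                · exact Or.inl h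
                · exact Or.inr ⟨o, Or.inl rfl, i, hi, he⟩
                · rcases h with ⟨o', ho', hrest⟩
                  exact Or.inr ⟨o', Or.inr ho', hrest⟩
              · rintro (h | ⟨o', ho' | ho', hrest⟩)
                · exact Or.inl (Or.inl h)
                · subst ho'; exact Or.inl (Or.inr hrest)
                · exact Or.inr ⟨o', ho', hrest⟩
        rw [key]
        exact Or.inr ⟨o, ho, (slice_range_iff_startswith o t).mpr hot⟩
      exact hmem
  · intro hnone
    constructor
    · intro hcont
      rw [PySem.Set.contains_iff] at hcont
      -- unfold the double fold to find the witness o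
      have key : ∀ (l : List String) (s : PySem.Set String),
          t ∈ l.foldl (fun s o =>
            (PySem.List.pyRange 0 ((PySem.Str.len o : Int) + 1)).foldl
              (fun s i => PySem.Set.add s (PySem.Str.slice o none (some i))) s) s
          → t ∈ s ∨ ∃ o ∈ l, PySem.Str.startswith o t = true := by
        intro l
        induction l with
        | nil => intro s h; exact Or.inl h
        | cons o rest ih =>
            intro s h
            rcases ih _ h with h' | ⟨o', ho', hsw⟩
            · rw [mem_foldl_add_map] at h'
              rcases h' with h'' | ⟨i, hi, he⟩
              · exact Or.inl h''
              · exact Or.inr ⟨o, List.mem_cons_self .., (slice_range_iff_startswith o t).mp ⟨i, hi, he⟩⟩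
            · exact Or.inr ⟨o', List.mem_cons_of_mem _ ho', hsw⟩
      rcases key other PySem.Set.empty hcont with h | ⟨o, ho, hsw⟩
      · simp [PySem.Set.empty] at h
      · exact hnone ⟨o, ho, by simp only [compare_keys, Bool.or_eq_true]; exact Or.inr hsw⟩
    · rintro ⟨i, hi, hcont⟩
      rw [PySem.Set.contains_iff, PySem.Set.mem_ofList] at hcont
      -- the slice t[:i] is some o ∈ other, so t startswith o
      have hsw : PySem.Str.startswith t (PySem.Str.slice t none (some i)) = true := by
        rw [PySem.List.mem_pyRange_one] at hi
        rw [PySem.Str.startswith_eq, PySem.Chars.startswith_iff,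
          PySem.Str.toList_slice, PySem.Chars.slice_eq_listSlice,
          PySem.List.slice_to t.toList hi.1]
        exact List.take_prefix _ _
      exact hnone ⟨_, hcont, by simp only [compare_keys, Bool.or_eq_true]; exact Or.inl hsw⟩

theorem foldl_if_not_append (p : String → Bool) (l : List String) (acc : List String) :
    l.foldl (fun acc x => if p x then acc else acc ++ [x]) acc
      = acc ++ l.filter (fun x => !p x) := by
  induction l generalizing acc with
  | nil => simp
  | cons x rest ih =>
      by_cases h : p x = true <;>
        simp [List.foldl_cons, h, ih, List.append_assoc]

-- ===== VERDICT (by name: the statement is the Claim_ definition above) =====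
theorem compare_list_of_keys_spec : Claim_equal_compare_list_of_keys := by
  intro this_ other _
  unfold Spec_compare_list_of_keys compare_list_of_keys compare_list_of_keys_alt
  simp only [foldl_if_not_append, List.nil_append]
  congr 1
  apply List.filter_congr
  intro t _
  rw [pvFoundA_eq_any, pred_eq]
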